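-- pv_equiv track=rewrite | github.com/DSC-SPIDAL/IndyCar | scripts/add_to_db.py | create_nested_json_T
-- ===== SOURCE A (Python) =====
-- def create_nested_json_T(data):
--     elements = data.split()
--     section_names = elements[::4]
--     section_lengths = elements[1::4]
--     section_start_labels = elements[2::4]
--     section_end_labels = elements[3::4]
--
--     section_data = [{"section_name": w, "section_length": x,
--                       "section_start_label": y, "section_end_label": z} for
--                       w, x, y, z in zip( section_names, section_lengths,
--                                          section_start_labels, section_end_labels)]
--     return section_data
-- ===== SOURCE B (Python) =====
-- def create_nested_json_T(data):
--     elements = data.split()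
--     section_data = []
--     i = 0
--     while i + 4 <= len(elements):
--         section_data.append({"section_name": elements[i],
--                              "section_length": elements[i + 1],
--                              "section_start_label": elements[i + 2],
--                              "section_end_label": elements[i + 3]})
--         i += 4
--     return section_data
-- ===== Notes on version B (the rewrite author's own statement) =====
-- stated objective: alternative
-- what changed: B walks the token list once in adjacent groups of four (index loop stepping by 4), instead of building four strided sub-lists and zipping them; zip's truncation of a partial trailing group becomes the i+4<=len loop bound.
import Mathlib
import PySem

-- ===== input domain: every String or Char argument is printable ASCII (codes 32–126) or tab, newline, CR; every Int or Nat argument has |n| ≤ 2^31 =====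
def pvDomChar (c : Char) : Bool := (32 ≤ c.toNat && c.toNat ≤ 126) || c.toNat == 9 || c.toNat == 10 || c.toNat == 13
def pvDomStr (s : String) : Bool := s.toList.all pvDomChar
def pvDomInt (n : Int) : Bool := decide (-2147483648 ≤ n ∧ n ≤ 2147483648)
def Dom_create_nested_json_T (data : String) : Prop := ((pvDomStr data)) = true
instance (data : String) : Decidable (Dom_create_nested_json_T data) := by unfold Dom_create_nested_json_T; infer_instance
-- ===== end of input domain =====

-- B walks the token list once in adjacent groups of four instead of zipping four strided sub-lists; same return value everywhere.

-- ===== PORT A =====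
def create_nested_json_T (data : String) : List (List (String × String)) :=
  let elements := PySem.Str.split₀ data
  -- step 4 ≠ 0, so each slice? is `some`; `.getD []` only discharges the Option
  let section_names := (PySem.List.slice? elements none none 4).getD []
  let section_lengths := (PySem.List.slice? elements (some 1) none 4).getD []
  let section_start_labels := (PySem.List.slice? elements (some 2) none 4).getD []
  let section_end_labels := (PySem.List.slice? elements (some 3) none 4).getD []
  (((section_names.zip section_lengths).zip section_start_labels).zip section_end_labels).map
    (fun p => [("section_name", p.1.1.1), ("section_length", p.1.1.2),
               ("section_start_label", p.1.2), ("section_end_label", p.2)])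

-- ===== PORT B =====
def pvChunkRows : List String → List (List (String × String))
  | w :: x :: y :: z :: rest =>
      [("section_name", w), ("section_length", x),
       ("section_start_label", y), ("section_end_label", z)] :: pvChunkRows rest
  | _ => []

def create_nested_json_T_alt (data : String) : List (List (String × String)) :=
  pvChunkRows (PySem.Str.split₀ data)

-- ===== PRECONDITION & SPEC =====
def Spec_create_nested_json_T (data : String) (out : List (List (String × String))) : Prop := out = create_nested_json_T_alt data
instance (data : String) (out : List (List (String × String))) : Decidable (Spec_create_nested_json_T data out) := by unfold Spec_create_nested_json_T; infer_instance

-- ===== CLAIM (what is proved, stated in full; the proofs are below) =====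
def Claim_equal_create_nested_json_T : Prop := ∀ (data : String), Dom_create_nested_json_T data → Spec_create_nested_json_T data (create_nested_json_T data)

-- ===== LEMMAS AND PROOFS =====
-- every 4th element starting at the head
def pvEvery4 {α : Type} : List α → List α
  | [] => []
  | [a] => [a]
  | [a, _] => [a]
  | [a, _, _] => [a]
  | a :: _ :: _ :: _ :: rest => a :: pvEvery4 rest

lemma pvEvery4_cons {α : Type} (a : α) (rest : List α) :
    pvEvery4 (a :: rest) = a :: pvEvery4 (rest.drop 3) := by
  match rest with
  | [] => rfl
  | [_] => rfl
  | [_, _] => rfl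
  | _ :: _ :: _ :: r => rfl

lemma pvFilterMap_range {α : Type} (n : Nat) (m : List α) (h : m.length ≤ 4 * n) :
    (List.range n).filterMap (fun k => m[4 * k]?) = pvEvery4 m := by
  induction n generalizing m with
  | zero =>
    have : m = [] := by cases m <;> simp_all
    subst this; simp [pvEvery4]
  | succ n ih =>
    cases m with
    | nil => simp [pvEvery4]
    | cons a rest =>
      rw [List.range_succ_eq_map, List.filterMap_cons, pvEvery4_cons]
      simp only [Nat.mul_zero, List.getElem?_cons_zero, List.filterMap_map, Function.comp_def]
      have hcong : (List.range n).filterMap (fun k => (a :: rest)[4 * (k + 1)]?)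
          = (List.range n).filterMap (fun k => (rest.drop 3)[4 * k]?) := by
        apply List.filterMap_congr
        intro k _
        rw [List.getElem?_drop, show 3 + 4 * k = (4 * (k+1)) - 1 by omega,
            show (4 * (k+1)) = ((4 * (k+1)) - 1) + 1 by omega, List.getElem?_cons_succ]
        congr 1
      rw [hcong, ih (rest.drop 3) (by simp at h ⊢; omega)]

lemma pvSlice4 {α : Type} (l : List α) (s : Nat) :
    PySem.List.slice? l (some (s : Int)) none 4 = some (pvEvery4 (l.drop s)) := by
  simp only [PySem.List.slice?, PySem.List.sliceIndices]
  have hneg : ¬ ((s : Int) < 0) := by omega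
  simp only [if_neg hneg, if_neg (by norm_num : ¬ ((4:Int) = 0)), if_pos (by norm_num : (0:Int) < 4), if_neg (by norm_num : ¬ ((4:Int) < 0))]
  by_cases hs : s < l.length
  · have hmin : min (s : Int) (l.length : Int) = (s : Int) := by omega
    rw [hmin, if_pos (by exact_mod_cast hs)]
    have hcnt : (((l.length : Int) - (s : Int) + 4 - 1) / 4).toNat = (l.length - s + 3) / 4 := by
      omega
    rw [hcnt]
    have hidx : ∀ x : Nat, ((s : Int) + 4 * (x : Int)).toNat = s + 4 * x := by
      intro x; omega
    have : (List.range ((l.length - s + 3) / 4)).filterMap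
            (fun (x : Nat) => l[((s : Int) + 4 * (x : Int)).toNat]?)
         = (List.range ((l.length - s + 3) / 4)).filterMap
            (fun x => (l.drop s)[4 * x]?) := by
      apply List.filterMap_congr
      intro x _
      rw [hidx x, List.getElem?_drop]
    rw [this, pvFilterMap_range _ _ (by simp; omega)]
  · have hmin : min (s : Int) (l.length : Int) = (l.length : Int) := by omega
    rw [hmin, if_neg (by omega)]
    have : l.drop s = [] := by
      apply List.drop_eq_nil_of_le; omega
    simp [this, pvEvery4]

lemma pvSlice4_none {α : Type} (l : List α) :
    PySem.List.slice? l none none 4 = some (pvEvery4 l) := by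
  simp only [PySem.List.slice?, PySem.List.sliceIndices]
  simp only [if_neg (by norm_num : ¬ ((4:Int) = 0)), if_pos (by norm_num : (0:Int) < 4),
    if_neg (by norm_num : ¬ ((4:Int) < 0))]
  by_cases h0 : 0 < l.length
  · rw [if_pos (by exact_mod_cast h0)]
    have hcnt : (((l.length : Int) - 0 + 4 - 1) / 4).toNat = (l.length + 3) / 4 := by omega
    rw [hcnt]
    have : (List.range ((l.length + 3) / 4)).filterMap
            (fun (x : Nat) => l[((0 : Int) + 4 * (x : Int)).toNat]?)
         = (List.range ((l.length + 3) / 4)).filterMap (fun x => l[4 * x]?) := by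
      apply List.filterMap_congr
      intro x _
      congr 1
      omega
    rw [this, pvFilterMap_range _ _ (by omega)]
  · rw [if_neg (by omega)]
    have : l = [] := by cases l <;> simp_all
    simp [this, pvEvery4]

lemma pvZipChunk (l : List String) :
    ((((pvEvery4 l).zip (pvEvery4 (l.drop 1))).zip (pvEvery4 (l.drop 2))).zip (pvEvery4 (l.drop 3))).map
      (fun p => [("section_name", p.1.1.1), ("section_length", p.1.1.2),
                 ("section_start_label", p.1.2), ("section_end_label", p.2)])
      = pvChunkRows l := by
  match l with
  | [] => rfl
  | [_] => rfl
  | [_, _] => rfl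
  | [_, _, _] => rfl
  | w :: x :: y :: z :: rest =>
    have ih := pvZipChunk rest
    simp only [List.drop_succ_cons, List.drop_zero, pvEvery4_cons, List.zip_cons_cons,
      List.map_cons, pvChunkRows]
    exact congrArg _ ih
termination_by l.length

-- ===== VERDICT (by name: the statement is the Claim_ definition above) =====
theorem create_nested_json_T_spec : Claim_equal_create_nested_json_T := by
  intro data _
  unfold Spec_create_nested_json_T create_nested_json_T create_nested_json_T_alt
  simp only [pvSlice4_none, show ((1:Int) = ((1:Nat):Int)) from rfl,
    show ((2:Int) = ((2:Nat):Int)) from rfl, show ((3:Int) = ((3:Nat):Int)) from rfl,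
    pvSlice4, Option.getD_some]
  exact pvZipChunk _
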